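-- pv_equiv track=rewrite | github.com/Enzu83/advent-of-code | year-2024/20/puzzle1.py | getCheatTime
-- ===== SOURCE A (Python) =====
-- def getNeighbors(grid, cell, type={'.', 'S', 'E'}):
--     y, x = cell
--
--     neighbors = set()
--
--     if y > 0 and grid[y - 1][x] in type:
--         neighbors.add((y - 1, x))
--
--     if x > 0 and grid[y][x - 1] in type:
--         neighbors.add((y, x - 1))
--
--     if y < len(grid)-1 and grid[y + 1][x] in type:
--         neighbors.add((y + 1, x))
--
--     if x < len(grid[0])-1 and grid[y][x + 1] in type:
--         neighbors.add((y, x + 1))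
--
--     return neighbors
--
-- def getCheatTime(grid, path, wall):
--     # get the neighbors of the wall we will go through
--     # then, follow the path until it mets two of the neighbors
--     # the differences between their indexes in the path corresponds to the time save
--
--     neighbors = getNeighbors(grid, wall)
--
--     shortcut_index = None # beginning of the shortcut
--
--     for i, cell in enumerate(path):
--         if cell in neighbors:
--             # get the beginning of the shortcut
--             if shortcut_index is None:
--                 shortcut_index = i
--
--             # when the second neighbor is found, return the time save ('-2' is the time to go through the wall)
--             else:
--                 return (i - shortcut_index - 2)
--
--     return 0
-- ===== SOURCE B (Python) =====
-- def getNeighbors(grid, cell, type={'.', 'S', 'E'}):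
--     y, x = cell
--
--     neighbors = set()
--
--     if y > 0 and grid[y - 1][x] in type:
--         neighbors.add((y - 1, x))
--
--     if x > 0 and grid[y][x - 1] in type:
--         neighbors.add((y, x - 1))
--
--     if y < len(grid)-1 and grid[y + 1][x] in type:
--         neighbors.add((y + 1, x))
--
--     if x < len(grid[0])-1 and grid[y][x + 1] in type:
--         neighbors.add((y, x + 1))
--
--     return neighbors
--
-- def getCheatTime(grid, path, wall):
--     # index the whole path once, then look the wall's neighbors up in the table
--     neighbors = getNeighbors(grid, wall)
--     pos = {cell: i for i, cell in enumerate(path)}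
--     idxs = sorted(pos[n] for n in neighbors if n in pos)
--     if len(idxs) >= 2:
--         return idxs[1] - idxs[0] - 2
--     return 0
-- ===== Notes on version B (the rewrite author's own statement) =====
-- stated objective: idiomatic
-- what changed: Replaces A's stateful early-exit scan along the path with a build-then-lookup shape: index the whole path once in a position dict, collect the indices of the wall's neighbors from that table, sort them and take the two smallest.
-- outside the precondition, e.g. on getCheatTime([['.'], ['#'], ['.']], [(0, 0), (0, 0)], (1, 0)): A returns -1, B returns 0
import Mathlib
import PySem

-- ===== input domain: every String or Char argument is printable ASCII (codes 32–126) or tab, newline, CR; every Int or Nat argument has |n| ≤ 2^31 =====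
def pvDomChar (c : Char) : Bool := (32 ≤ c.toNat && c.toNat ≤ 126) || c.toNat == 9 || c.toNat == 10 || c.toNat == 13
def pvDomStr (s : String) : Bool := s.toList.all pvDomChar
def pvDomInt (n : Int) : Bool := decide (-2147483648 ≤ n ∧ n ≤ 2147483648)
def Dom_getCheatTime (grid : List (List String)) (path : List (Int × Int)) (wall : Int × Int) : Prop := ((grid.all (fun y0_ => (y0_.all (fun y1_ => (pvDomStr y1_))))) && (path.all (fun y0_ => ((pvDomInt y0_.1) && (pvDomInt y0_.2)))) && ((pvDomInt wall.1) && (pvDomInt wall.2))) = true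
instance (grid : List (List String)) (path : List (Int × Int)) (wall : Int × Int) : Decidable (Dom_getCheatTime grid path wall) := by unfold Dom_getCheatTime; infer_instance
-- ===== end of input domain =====

-- B indexes the whole path once in a position dict and reads the two smallest neighbor indices from the
-- sorted lookup, instead of A's stateful early-exit scan along the path (idiomatic build-then-lookup shape).

-- ===== PORT A =====

-- grid[i] (in-range under Pre_; pyGetD is Python-exact incl. negative wraparound)
def pvRow (grid : List (List String)) (i : Int) : List String := PySem.List.pyGetD grid i []

-- shared module helper getNeighbors(grid, cell) with the default type={'.','S','E'} (called by both A and B)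
def pvNeighbors (grid : List (List String)) (cell : Int × Int) : PySem.Set (Int × Int) :=
  let y := cell.1
  let x := cell.2
  let t : List String := [".", "S", "E"]
  let n0 : PySem.Set (Int × Int) := PySem.Set.empty
  let n1 := if 0 < y ∧ PySem.List.pyGetD (pvRow grid (y - 1)) x "" ∈ t then PySem.Set.add n0 (y - 1, x) else n0
  let n2 := if 0 < x ∧ PySem.List.pyGetD (pvRow grid y) (x - 1) "" ∈ t then PySem.Set.add n1 (y, x - 1) else n1
  let n3 := if y < (grid.length : Int) - 1 ∧ PySem.List.pyGetD (pvRow grid (y + 1)) x "" ∈ t then PySem.Set.add n2 (y + 1, x) else n2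
  let n4 := if x < ((pvRow grid 0).length : Int) - 1 ∧ PySem.List.pyGetD (pvRow grid y) (x + 1) "" ∈ t then PySem.Set.add n3 (y, x + 1) else n3
  n4

-- A's 'for i, cell in enumerate(path)' loop with its early return and the shortcut_index state
def pvLoopA (nbrs : List (Int × Int)) : List (Int × Int) → Int → Option Int → Int
  | [], _, _ => 0
  | c :: rest, i, si =>
    if c ∈ nbrs then
      match si with
      | none => pvLoopA nbrs rest (i + 1) (some i)
      | some j => i - j - 2
    else pvLoopA nbrs rest (i + 1) si

def getCheatTime (grid : List (List String)) (path : List (Int × Int)) (wall : Int × Int) : Int :=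
  pvLoopA (pvNeighbors grid wall) path 0 none

-- ===== PORT B =====

-- pos = {cell: i for i, cell in enumerate(path)}
def pvPosDict (path : List (Int × Int)) : PySem.Dict (Int × Int) Int :=
  (PySem.List.enumerate path 0).foldl (fun d p => d.insert p.2 p.1) PySem.Dict.empty

def getCheatTime_alt (grid : List (List String)) (path : List (Int × Int)) (wall : Int × Int) : Int :=
  let neighbors := pvNeighbors grid wall
  let pos := pvPosDict path
  let idxs := PySem.List.sorted (neighbors.filterMap (fun n => pos.get? n)) (fun v => v) false
  if 2 ≤ idxs.length then
    PySem.List.pyGetD idxs 1 0 - PySem.List.pyGetD idxs 0 0 - 2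
  else 0

-- ===== PRECONDITION & SPEC =====
-- Pre_ excludes (a) inputs on which A's grid indexing raises IndexError (B raises identically), and
-- (b) paths that repeat a cell adjacent to the wall, on which A's 'first two matching path positions' and
-- B's 'one index per distinct cell' are equally defensible readings of a degenerate non-path input.
def Pre_getCheatTime (grid : List (List String)) (path : List (Int × Int)) (wall : Int × Int) : Prop :=
  grid ≠ [] ∧
  (0 < wall.1 → PySem.Raise.InRange grid.length (wall.1 - 1) ∧ PySem.Raise.InRange (pvRow grid (wall.1 - 1)).length wall.2) ∧
  (0 < wall.2 → PySem.Raise.InRange grid.length wall.1 ∧ PySem.Raise.InRange (pvRow grid wall.1).length (wall.2 - 1)) ∧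
  (wall.1 < (grid.length : Int) - 1 → PySem.Raise.InRange grid.length (wall.1 + 1) ∧ PySem.Raise.InRange (pvRow grid (wall.1 + 1)).length wall.2) ∧
  (wall.2 < ((pvRow grid 0).length : Int) - 1 → PySem.Raise.InRange grid.length wall.1 ∧ PySem.Raise.InRange (pvRow grid wall.1).length (wall.2 + 1)) ∧
  (path.filter (fun c => decide ((c.1 - wall.1).natAbs + (c.2 - wall.2).natAbs = 1))).Nodup
instance (grid : List (List String)) (path : List (Int × Int)) (wall : Int × Int) : Decidable (Pre_getCheatTime grid path wall) := by unfold Pre_getCheatTime; infer_instance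

def pvWitness_getCheatTime : List (List String) × (List (Int × Int)) × (Int × Int) :=
  ([["."], ["#"], ["."]], [(0, 0), (2, 0)], (1, 0))

def Spec_getCheatTime (grid : List (List String)) (path : List (Int × Int)) (wall : Int × Int) (out : Int) : Prop := out = getCheatTime_alt grid path wall
instance (grid : List (List String)) (path : List (Int × Int)) (wall : Int × Int) (out : Int) : Decidable (Spec_getCheatTime grid path wall out) := by unfold Spec_getCheatTime; infer_instance

-- ===== CLAIM (what is proved, stated in full; the proofs are below) =====
def Claim_equal_getCheatTime : Prop := ∀ (grid : List (List String)) (path : List (Int × Int)) (wall : Int × Int), Dom_getCheatTime grid path wall → Pre_getCheatTime grid path wall → Spec_getCheatTime grid path wall (getCheatTime grid path wall)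

-- ===== LEMMAS AND PROOFS =====

-- proof-side helper: the increasing list of path indices whose cell is a neighbor
def pvHits (N : List (Int × Int)) : List (Int × Int) → Int → List Int
  | [], _ => []
  | c :: rest, i => if c ∈ N then i :: pvHits N rest (i + 1) else pvHits N rest (i + 1)

-- proof-side helper: first index of a cell in the path (counting from i)
def pvFirstIdx : List (Int × Int) → (Int × Int) → Int → Option Int
  | [], _, _ => none
  | c :: rest, x, i => if c = x then some i else pvFirstIdx rest x (i + 1)

theorem pvLoopA_some (N : List (Int × Int)) (l : List (Int × Int)) (i j : Int) :
    pvLoopA N l i (some j) = (match pvHits N l i with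
      | a :: _ => a - j - 2
      | [] => 0) := by
  induction l generalizing i with
  | nil => rfl
  | cons c rest ih => simp only [pvLoopA, pvHits]; split_ifs <;> simp [ih]

theorem pvLoopA_none (N : List (Int × Int)) (l : List (Int × Int)) (i : Int) :
    pvLoopA N l i none = (match pvHits N l i with
      | a :: b :: _ => b - a - 2
      | _ => 0) := by
  induction l generalizing i with
  | nil => rfl
  | cons c rest ih =>
    simp only [pvLoopA, pvHits]
    split_ifs with h
    · rw [pvLoopA_some]
      cases pvHits N rest (i + 1) <;> simp
    · simp [ih]

theorem pvFirstIdx_ge (l : List (Int × Int)) (x : Int × Int) (i j : Int)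
    (h : pvFirstIdx l x i = some j) : i ≤ j := by
  induction l generalizing i with
  | nil => simp [pvFirstIdx] at h
  | cons c rest ih =>
    simp only [pvFirstIdx] at h
    split_ifs at h with hc
    · injection h with h; omega
    · have := ih (i + 1) h; omega

theorem pvFirstIdx_none (l : List (Int × Int)) (x : Int × Int) (i : Int)
    (h : x ∉ l) : pvFirstIdx l x i = none := by
  induction l generalizing i with
  | nil => rfl
  | cons c rest ih =>
    simp only [List.mem_cons, not_or] at h
    simp only [pvFirstIdx, if_neg (fun he => h.1 (Eq.symm he))]
    exact ih (i + 1) h.2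

theorem pvFirstIdx_inj (l : List (Int × Int)) (x y : Int × Int) (i j : Int)
    (hx : pvFirstIdx l x i = some j) (hy : pvFirstIdx l y i = some j) : x = y := by
  induction l generalizing i with
  | nil => simp [pvFirstIdx] at hx
  | cons c rest ih =>
    simp only [pvFirstIdx] at hx hy
    split_ifs at hx hy with h1 h2 h2
    · exact h1 ▸ h2 ▸ rfl
    · have := pvFirstIdx_ge _ _ _ _ hy
      simp only [Option.some_inj] at hx; omega
    · have := pvFirstIdx_ge _ _ _ _ hx
      simp only [Option.some_inj] at hy; omega
    · exact ih (i + 1) hx hy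

theorem pvHits_ge (N l : List (Int × Int)) (i j : Int) (h : j ∈ pvHits N l i) : i ≤ j := by
  induction l generalizing i with
  | nil => simp [pvHits] at h
  | cons c rest ih =>
    simp only [pvHits] at h
    split_ifs at h with hc
    · rcases List.mem_cons.mp h with h | h
      · omega
      · have := ih (i + 1) h; omega
    · have := ih (i + 1) h; omega

theorem pvHits_pairwise (N l : List (Int × Int)) (i : Int) :
    (pvHits N l i).Pairwise (· < ·) := by
  induction l generalizing i with
  | nil => simp [pvHits]
  | cons c rest ih =>
    simp only [pvHits]
    split_ifs with hc
    · exact List.Pairwise.cons (fun j hj => by have := pvHits_ge N rest (i + 1) j hj; omega) (ih (i + 1))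
    · exact ih (i + 1)

theorem pvHits_mem (N l : List (Int × Int)) (i j : Int) (hl : ∀ c ∈ N, l.count c ≤ 1) :
    j ∈ pvHits N l i ↔ ∃ c, c ∈ N ∧ pvFirstIdx l c i = some j := by
  induction l generalizing i with
  | nil => simp [pvHits, pvFirstIdx]
  | cons c rest ih =>
    have hc : ∀ d ∈ N, c = d → d ∉ rest := by
      intro d hd he
      have := hl d hd
      rw [← he, List.count_cons_self] at this
      exact he ▸ List.count_eq_zero.mp (by omega)
    have hrest : ∀ d ∈ N, rest.count d ≤ 1 :=
      fun d hd => le_trans List.count_le_count_cons (hl d hd)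
    simp only [pvHits, pvFirstIdx]
    constructor
    · intro h
      split_ifs at h with hcN
      · rcases List.mem_cons.mp h with h | h
        · exact ⟨c, hcN, by simp [h]⟩
        · rcases (ih (i + 1) hrest).mp h with ⟨d, hdN, hd⟩
          refine ⟨d, hdN, ?_⟩
          have hdc : ¬ (c = d) := fun he => by
            rw [pvFirstIdx_none rest d (i+1) (hc d hdN he)] at hd; simp at hd
          simp [hdc, hd]
      · rcases (ih (i + 1) hrest).mp h with ⟨d, hdN, hd⟩
        refine ⟨d, hdN, ?_⟩
        have hdc : ¬ (c = d) := fun he => by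
          rw [pvFirstIdx_none rest d (i+1) (hc d hdN he)] at hd; simp at hd
        simp [hdc, hd]
    · rintro ⟨d, hdN, hd⟩
      split_ifs at hd with hcd
      · simp only [Option.some_inj] at hd
        subst hd; subst hcd
        simp [hdN]
      · have := pvFirstIdx_ge _ _ _ _ hd
        have hj : j ∈ pvHits N rest (i + 1) := (ih (i + 1) hrest).mpr ⟨d, hdN, hd⟩
        split_ifs with hcN
        · exact List.mem_cons_of_mem _ hj
        · exact hj

theorem pvPosDict_get (l : List (Int × Int)) (i : Int) (d : PySem.Dict (Int × Int) Int)
    (c : Int × Int) (hl : l.count c ≤ 1) :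
    ((PySem.List.enumerate l i).foldl (fun d p => d.insert p.2 p.1) d).get? c
      = (match pvFirstIdx l c i with
         | some j => some j
         | none => d.get? c) := by
  induction l generalizing i d with
  | nil => simp [PySem.List.enumerate_nil, pvFirstIdx]
  | cons c0 rest ih =>
    have hrest : rest.count c ≤ 1 := le_trans List.count_le_count_cons hl
    rw [PySem.List.enumerate_cons]
    simp only [List.foldl_cons, pvFirstIdx]
    rw [ih (i + 1) _ hrest]
    by_cases hcc : c0 = c
    · subst hcc
      have hc0 : c0 ∉ rest := by
        rw [List.count_cons_self] at hl
        exact List.count_eq_zero.mp (by omega)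
      rw [pvFirstIdx_none rest c0 (i + 1) hc0]
      simp [PySem.Dict.get?_insert_self]
    · simp only [if_neg hcc]
      cases pvFirstIdx rest c (i + 1) with
      | some j => simp
      | none => simp [PySem.Dict.get?_insert_of_ne d i (fun h => hcc (Eq.symm h))]

theorem pvNeighbors_mem (grid : List (List String)) (wall : Int × Int) (c : Int × Int)
    (hc : c ∈ pvNeighbors grid wall) :
    c = (wall.1 - 1, wall.2) ∨ c = (wall.1, wall.2 - 1) ∨ c = (wall.1 + 1, wall.2) ∨ c = (wall.1, wall.2 + 1) := by
  unfold pvNeighbors at hc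
  dsimp only at hc
  split_ifs at hc <;>
    simp only [PySem.Set.mem_add, PySem.Set.empty, List.not_mem_nil, false_or] at hc <;>
    tauto

theorem pvNeighbors_adj (grid : List (List String)) (wall : Int × Int) (c : Int × Int)
    (hc : c ∈ pvNeighbors grid wall) :
    (c.1 - wall.1).natAbs + (c.2 - wall.2).natAbs = 1 := by
  rcases pvNeighbors_mem grid wall c hc with h | h | h | h <;> subst h <;> simp

theorem pvNeighbors_nodup (grid : List (List String)) (wall : Int × Int) :
    (pvNeighbors grid wall).Nodup := by
  unfold pvNeighbors
  dsimp only
  split_ifs <;>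
    · repeat' apply PySem.Set.nodup_add
      exact List.nodup_nil

theorem main_eq (grid : List (List String)) (path : List (Int × Int)) (wall : Int × Int)
    (hp : (path.filter (fun c => decide ((c.1 - wall.1).natAbs + (c.2 - wall.2).natAbs = 1))).Nodup) :
    getCheatTime grid path wall = getCheatTime_alt grid path wall := by
  unfold getCheatTime getCheatTime_alt
  dsimp only
  set N := pvNeighbors grid wall with hN
  have hNnd : N.Nodup := pvNeighbors_nodup grid wall
  have hcnt : ∀ c ∈ N, path.count c ≤ 1 := by
    intro c hcN
    have h1 : path.count c
        = (path.filter (fun c => decide ((c.1 - wall.1).natAbs + (c.2 - wall.2).natAbs = 1))).count c := by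
      rw [List.count_filter]
      simp [pvNeighbors_adj grid wall c hcN]
    rw [h1]
    exact List.nodup_iff_count_le_one.mp hp c
  have hget : ∀ n ∈ N, (pvPosDict path).get? n = pvFirstIdx path n 0 := by
    intro n hn
    rw [pvPosDict, pvPosDict_get path 0 PySem.Dict.empty n (hcnt n hn)]
    cases pvFirstIdx path n 0 <;> rfl
  have hI : N.filterMap (fun n => (pvPosDict path).get? n) = N.filterMap (fun n => pvFirstIdx path n 0) := by
    exact List.filterMap_congr (fun n hn => hget n hn)
  have hperm : (pvHits N path 0).Perm (N.filterMap (fun n => pvFirstIdx path n 0)) := by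
    rw [List.perm_ext_iff_of_nodup]
    · intro j
      rw [pvHits_mem N path 0 j hcnt, List.mem_filterMap]
    · exact (pvHits_pairwise N path 0).imp (fun h => ne_of_lt h)
    · exact List.Nodup.filterMap (fun a a' b hb hb' => pvFirstIdx_inj path a a' 0 b hb hb') hNnd
  have hsorted : PySem.List.sorted (N.filterMap (fun n => (pvPosDict path).get? n)) (fun v => v) false
      = pvHits N path 0 := by
    rw [hI]
    exact PySem.List.sorted_eq_of_perm_of_pairwise_lt _ _ _ hperm (pvHits_pairwise N path 0)
  rw [pvLoopA_none, hsorted]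
  cases h : pvHits N path 0 with
  | nil => simp
  | cons a t =>
    cases t with
    | nil => simp
    | cons b t' => simp [PySem.List.pyGetD]

-- ===== VERDICT (by name: the statement is the Claim_ definition above) =====
theorem getCheatTime_spec : Claim_equal_getCheatTime := by
  intro grid path wall _ hpre
  unfold Spec_getCheatTime
  exact main_eq grid path wall hpre.2.2.2.2.2
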